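-- pv_equiv track=rewrite | github.com/Suerine/classSchedulerApp | app.py | group_by_time
-- ===== SOURCE A (Python) =====
-- def group_by_time(schedule_data):
--  grouped_schedule = {}
--  for course_code, entry in schedule_data.items():
--      time_slot = entry["TimeSlot"]
--      days = entry["Days"]
--      key = f"{time_slot}/{days}"
--      if key in grouped_schedule:
--          grouped_schedule[key][course_code] = entry
--      else:
--          grouped_schedule[key] = {course_code: entry}
--  return grouped_schedule
-- ===== SOURCE B (Python) =====
-- def group_by_time(schedule_data):
--     keyed = [("{}/{}".format(entry["TimeSlot"], entry["Days"]), (course_code, entry))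
--              for course_code, entry in schedule_data.items()]
--     return {key: dict(member for k, member in keyed if k == key)
--             for key in dict.fromkeys(k for k, _ in keyed)}
-- ===== Notes on version B (the rewrite author's own statement) =====
-- stated objective: alternative
-- what changed: Replaces A's single accumulate-into-a-dict pass (membership test + in-place insert per entry) with a two-phase plan: compute each entry's 'TimeSlot/Days' key once into a keyed list, then build the result as a comprehension over the first-occurrence-deduplicated keys, each group gathered by a per-key scan of the keyed list.
import Mathlib
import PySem

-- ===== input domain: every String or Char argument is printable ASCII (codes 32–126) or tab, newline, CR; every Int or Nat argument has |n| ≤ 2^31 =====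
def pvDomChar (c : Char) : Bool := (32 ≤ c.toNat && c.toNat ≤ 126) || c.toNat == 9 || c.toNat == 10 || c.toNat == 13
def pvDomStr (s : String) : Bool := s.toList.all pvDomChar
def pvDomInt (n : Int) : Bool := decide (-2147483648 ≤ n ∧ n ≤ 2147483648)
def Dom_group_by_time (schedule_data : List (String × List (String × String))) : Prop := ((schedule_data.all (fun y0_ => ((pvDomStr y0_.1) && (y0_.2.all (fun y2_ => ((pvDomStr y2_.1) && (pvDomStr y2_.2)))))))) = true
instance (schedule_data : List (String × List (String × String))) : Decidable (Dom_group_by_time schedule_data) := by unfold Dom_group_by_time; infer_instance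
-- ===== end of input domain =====

-- B replaces A's accumulate-into-a-dict pass by a two-phase plan: compute every entry's
-- "TimeSlot/Days" key once, then build each group by a per-key scan over that keyed list
-- (ordered by first occurrence of the key) — an alternative decomposition, not faster.

-- ===== PORT A =====
-- Python dicts are association lists here; under Pre_ the lookups entry["TimeSlot"] /
-- entry["Days"] always succeed, so getD's default is never reached.
def group_by_time (schedule_data : List (String × List (String × String))) : List (String × List (String × List (String × String))) :=
  (schedule_data.foldl
    (fun grouped ce =>
      let entry : PySem.Dict String String := PySem.Dict.mk ce.2
      let time_slot := entry.getD "TimeSlot" ""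
      let days := entry.getD "Days" ""
      let key := time_slot ++ "/" ++ days
      if grouped.contains key then
        grouped.insert key ((grouped.getD key PySem.Dict.empty).insert ce.1 ce.2)
      else
        grouped.insert key (PySem.Dict.mk [(ce.1, ce.2)]))
    (PySem.Dict.empty : PySem.Dict String (PySem.Dict String (List (String × String))))).items.map
    (fun p => (p.1, p.2.items))

-- ===== PORT B =====
def group_by_time_alt (schedule_data : List (String × List (String × String))) : List (String × List (String × List (String × String))) :=
  let keyed := schedule_data.map (fun ce =>
    let entry : PySem.Dict String String := PySem.Dict.mk ce.2
    (entry.getD "TimeSlot" "" ++ "/" ++ entry.getD "Days" "", (ce.1, ce.2)))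
  (PySem.List.dedup (keyed.map (·.1))).map
    (fun key => (key, (PySem.Dict.ofList ((keyed.filter (fun p => p.1 == key)).map (·.2))).items))

-- ===== PRECONDITION & SPEC =====
-- Pre_ excludes (a) entries missing a "TimeSlot" or "Days" key, on which A raises KeyError,
-- and (b) association lists with duplicate outer or inner keys, which do not represent a
-- Python dict (A's input is a dict, so such lists never arise).
def Pre_group_by_time (schedule_data : List (String × List (String × String))) : Prop :=
  (schedule_data.map Prod.fst).Nodup ∧
  ∀ p ∈ schedule_data, (p.2.map Prod.fst).Nodup ∧
    "TimeSlot" ∈ p.2.map Prod.fst ∧ "Days" ∈ p.2.map Prod.fst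
instance (schedule_data : List (String × List (String × String))) : Decidable (Pre_group_by_time schedule_data) := by unfold Pre_group_by_time; infer_instance

def pvWitness_group_by_time : (List (String × List (String × String))) :=
  [("CS101", [("TimeSlot", "8-10"), ("Days", "Mon")]),
   ("MA201", [("TimeSlot", "8-10"), ("Days", "Mon")]),
   ("PH105", [("TimeSlot", "10-12"), ("Days", "Tue")])]

def Spec_group_by_time (schedule_data : List (String × List (String × String))) (out : List (String × List (String × List (String × String)))) : Prop := out = group_by_time_alt schedule_data
instance (schedule_data : List (String × List (String × String))) (out : List (String × List (String × List (String × String)))) : Decidable (Spec_group_by_time schedule_data out) := by unfold Spec_group_by_time; infer_instance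

-- ===== CLAIM (what is proved, stated in full; the proofs are below) =====
def Claim_equal_group_by_time : Prop := ∀ (schedule_data : List (String × List (String × String))), Dom_group_by_time schedule_data → Pre_group_by_time schedule_data → Spec_group_by_time schedule_data (group_by_time schedule_data)

-- ===== LEMMAS AND PROOFS =====

-- the key both programs compute for an entry
def pvKey (ce : String × List (String × String)) : String :=
  (PySem.Dict.mk ce.2).getD "TimeSlot" "" ++ "/" ++ (PySem.Dict.mk ce.2).getD "Days" ""

-- A's loop body, named for the proofs (definitionally the lambda in group_by_time)
def pvStep (grouped : PySem.Dict String (PySem.Dict String (List (String × String))))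
    (ce : String × List (String × String)) :
    PySem.Dict String (PySem.Dict String (List (String × String))) :=
  if grouped.contains (pvKey ce) then
    grouped.insert (pvKey ce) ((grouped.getD (pvKey ce) PySem.Dict.empty).insert ce.1 ce.2)
  else
    grouped.insert (pvKey ce) (PySem.Dict.mk [(ce.1, ce.2)])

lemma pvMk_insert (ms : List (String × List (String × String))) (cc : String)
    (e : List (String × String)) (h : (PySem.Dict.mk ms).contains cc = false) :
    (PySem.Dict.mk ms).insert cc e = PySem.Dict.mk (ms ++ [(cc, e)]) :=
  PySem.Dict.ext (PySem.Dict.items_insert_of_not_contains _ _ h)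

lemma pvDedup_append (xs : List String) (a : String) :
    PySem.List.dedup (xs ++ [a])
      = if a ∈ xs then PySem.List.dedup xs else PySem.List.dedup xs ++ [a] := by
  simp only [PySem.List.dedup, PySem.Set.ofList_eq_foldl, List.foldl_append, List.foldl_cons,
    List.foldl_nil]
  rw [← PySem.Set.ofList_eq_foldl]
  simp only [PySem.Set.add, PySem.Set.contains, List.contains_eq_mem, PySem.Set.mem_ofList,
    decide_eq_true_eq]

lemma pvItems_ofList (ms : List (String × List (String × String)))
    (h : (ms.map Prod.fst).Nodup) : (PySem.Dict.ofList ms).items = ms := by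
  have hf := PySem.Dict.items_foldl_insert_fresh ms Prod.fst Prod.snd PySem.Dict.empty
    (fun a _ => rfl) h
  simpa [PySem.Dict.ofList, PySem.Dict.update] using hf

lemma pvFoldA (l : List (String × List (String × String)))
    (h : (l.map Prod.fst).Nodup) :
    l.foldl pvStep PySem.Dict.empty
      = PySem.Dict.mk ((PySem.List.dedup (l.map pvKey)).map
          (fun k => (k, PySem.Dict.mk (l.filter (fun ce => pvKey ce == k))))) := by
  induction l using List.reverseRecOn with
  | nil => rfl
  | append_singleton l x ih =>
    rw [List.map_append, List.nodup_append] at h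
    obtain ⟨h1, -, hdisj⟩ := h
    have hx1 : x.1 ∉ l.map Prod.fst := fun hmem => hdisj _ hmem x.1 (by simp) rfl
    rw [List.foldl_append, List.foldl_cons, List.foldl_nil, ih h1]
    have hkeysNodup : (PySem.Dict.mk ((PySem.List.dedup (l.map pvKey)).map
        (fun k => (k, PySem.Dict.mk (l.filter (fun ce => pvKey ce == k)))))).keys.Nodup := by
      simp [PySem.Dict.keys, List.map_map, Function.comp_def]
    have hcont : (PySem.Dict.mk ((PySem.List.dedup (l.map pvKey)).map
        (fun k => (k, PySem.Dict.mk (l.filter (fun ce => pvKey ce == k)))))).contains (pvKey x)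
        = decide (pvKey x ∈ l.map pvKey) := by
      simp [PySem.Dict.contains, List.any_map, Function.comp_def, List.any_beq']
    by_cases hK : pvKey x ∈ l.map pvKey
    · -- the key already has a group: the new member is appended to it
      have hcontT : (PySem.Dict.mk ((PySem.List.dedup (l.map pvKey)).map
          (fun k => (k, PySem.Dict.mk (l.filter (fun ce => pvKey ce == k)))))).contains (pvKey x)
          = true := by rw [hcont]; exact decide_eq_true hK
      have hmemD : pvKey x ∈ PySem.List.dedup (l.map pvKey) :=
        (PySem.List.mem_dedup _ _).mpr hK
      have hgetD : (PySem.Dict.mk ((PySem.List.dedup (l.map pvKey)).map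
          (fun k => (k, PySem.Dict.mk (l.filter (fun ce => pvKey ce == k)))))).getD (pvKey x)
            PySem.Dict.empty
          = PySem.Dict.mk (l.filter (fun ce => pvKey ce == pvKey x)) :=
        PySem.Dict.getD_of_mem_items _ (List.mem_map_of_mem (f := fun k => (k, PySem.Dict.mk (l.filter (fun ce => pvKey ce == k)))) hmemD) hkeysNodup _
      have hcc : (PySem.Dict.mk (l.filter (fun ce => pvKey ce == pvKey x))).contains x.1
          = false := by
        rw [Bool.eq_false_iff]
        simp only [ne_eq, PySem.Dict.contains, List.any_eq_true, List.mem_filter, beq_iff_eq]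
        rintro ⟨p, ⟨hpl, -⟩, hp1⟩
        exact hx1 (hp1 ▸ List.mem_map_of_mem (f := Prod.fst) hpl)
      rw [pvStep, if_pos hcontT, hgetD, pvMk_insert _ _ _ hcc]
      apply PySem.Dict.ext
      rw [PySem.Dict.items_insert_of_contains _ _ hcontT]
      show ((PySem.List.dedup (l.map pvKey)).map _).map _ = _
      simp only [List.map_append, List.map_cons, List.map_nil]
      rw [pvDedup_append, if_pos hK, List.map_map]
      apply List.map_congr_left
      intro k hk
      by_cases hkK : k = pvKey x
      · subst hkK
        simp [List.filter_append]
      · have : (pvKey x == k) = false := by simp [Ne.symm hkK]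
        simp [Function.comp, List.filter_append, this, hkK]
    · -- a fresh key: a new singleton group is appended
      have hcontF : (PySem.Dict.mk ((PySem.List.dedup (l.map pvKey)).map
          (fun k => (k, PySem.Dict.mk (l.filter (fun ce => pvKey ce == k)))))).contains (pvKey x)
          = false := by rw [hcont]; exact decide_eq_false hK
      rw [pvStep, if_neg (by rw [hcontF]; exact Bool.false_ne_true)]
      apply PySem.Dict.ext
      rw [PySem.Dict.items_insert_of_not_contains _ _ hcontF]
      show ((PySem.List.dedup (l.map pvKey)).map _) ++ _ = _
      simp only [List.map_append, List.map_cons, List.map_nil]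
      rw [pvDedup_append, if_neg hK, List.map_append]
      congr 1
      · apply List.map_congr_left
        intro k hk
        have hkl : k ∈ l.map pvKey := (PySem.List.mem_dedup _ _).mp hk
        have : (pvKey x == k) = false := by
          simp only [beq_eq_false_iff_ne, ne_eq]; rintro rfl; exact hK hkl
        simp [List.filter_append, this]
      · have hnil : l.filter (fun ce => pvKey ce == pvKey x) = [] := by
          rw [List.filter_eq_nil_iff]
          intro ce hce
          simp only [beq_iff_eq]
          intro hEq
          exact hK (hEq ▸ List.mem_map_of_mem (f := pvKey) hce)
        simp [List.filter_append, hnil]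

lemma pvAlt_eq (l : List (String × List (String × String))) :
    group_by_time_alt l
      = (PySem.List.dedup (l.map pvKey)).map
          (fun k => (k, (PySem.Dict.ofList (l.filter (fun ce => pvKey ce == k))).items)) := by
  simp only [group_by_time_alt]
  rw [List.map_map]
  have h1 : ((fun p : String × (String × List (String × String)) => p.1) ∘
      (fun ce : String × List (String × String) =>
        ((PySem.Dict.mk ce.2).getD "TimeSlot" "" ++ "/" ++ (PySem.Dict.mk ce.2).getD "Days" "",
          (ce.1, ce.2)))) = pvKey := rfl
  rw [h1]
  apply List.map_congr_left
  intro k _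
  rw [List.filter_map, List.map_map]
  have h2 : ((fun x : String × (String × List (String × String)) => x.2) ∘
      (fun ce : String × List (String × String) =>
        ((PySem.Dict.mk ce.2).getD "TimeSlot" "" ++ "/" ++ (PySem.Dict.mk ce.2).getD "Days" "",
          (ce.1, ce.2)))) = id := rfl
  have h3 : ((fun p : String × (String × List (String × String)) => p.1 == k) ∘
      (fun ce : String × List (String × String) =>
        ((PySem.Dict.mk ce.2).getD "TimeSlot" "" ++ "/" ++ (PySem.Dict.mk ce.2).getD "Days" "",
          (ce.1, ce.2)))) = (fun ce => pvKey ce == k) := rfl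
  rw [h2, h3, List.map_id]

theorem pv_main (l : List (String × List (String × String)))
    (hnd : (l.map Prod.fst).Nodup) :
    group_by_time l = group_by_time_alt l := by
  have e1 : group_by_time l
      = (l.foldl pvStep PySem.Dict.empty).items.map (fun p => (p.1, p.2.items)) := rfl
  rw [e1, pvFoldA l hnd, pvAlt_eq]
  show ((PySem.List.dedup (l.map pvKey)).map _).map _ = _
  rw [List.map_map]
  apply List.map_congr_left
  intro k _
  have hms : ((l.filter (fun ce => pvKey ce == k)).map Prod.fst).Nodup :=
    List.Nodup.sublist (List.Sublist.map Prod.fst List.filter_sublist) hnd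
  simp only [Function.comp_def]
  rw [pvItems_ofList _ hms]

-- ===== VERDICT (by name: the statement is the Claim_ definition above) =====
theorem group_by_time_spec : Claim_equal_group_by_time := by
  intro sd _ hpre
  unfold Spec_group_by_time
  exact pv_main sd hpre.1
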